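-- pv_equiv track=rewrite | github.com/SEONMl/Solutions | venv/Category/Challenge/2023EleventhMarket/N3.py | solution
-- ===== SOURCE A (Python) =====
-- def solution(S, C):
--     N=len(S)
--     S+="Z"
--     C.append(0)
--     memo=[C[0], C[0]] # 연속된 문자 비용합, 그 중 최고 비용
--     answer=0
--     prev=0
--     for i in range(1,N+1):
--         if S[prev]!=S[i]:
--             prev=i
--             answer+= memo[0]-memo[1]
--             memo=[C[i],C[i]]
--         else:
--             memo[0]+=C[i]
--             memo[1]=max(memo[1], C[i])
--     return answer
-- ===== SOURCE B (Python) =====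
-- def solution(S, C):
--     # Same return value as A; preserves A's in-place side effect C.append(0).
--     # Splits the sentinel-extended (char, cost) pairs into maximal runs and
--     # adds sum(costs) - max(costs) for every run except the last (the run
--     # holding the sentinel, which A never flushes).
--     S = S + "Z"
--     C.append(0)
--     pairs = list(zip(S, C))
--     total = 0
--     while pairs:
--         c = pairs[0][0]
--         k = 1
--         while k < len(pairs) and pairs[k][0] == c:
--             k += 1
--         if k == len(pairs):
--             break
--         costs = [x for _, x in pairs[:k]]
--         total += sum(costs) - max(costs)
--         pairs = pairs[k:]
--     return total
-- ===== Notes on version B (the rewrite author's own statement) =====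
-- stated objective: alternative
-- what changed: Replaces A's one-pass state machine (running run-sum/run-max/prev index flushed on each character change) by explicitly peeling maximal runs off the sentinel-extended (char,cost) pair list and adding sum(costs)-max(costs) for every run except the last.
import Mathlib
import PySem

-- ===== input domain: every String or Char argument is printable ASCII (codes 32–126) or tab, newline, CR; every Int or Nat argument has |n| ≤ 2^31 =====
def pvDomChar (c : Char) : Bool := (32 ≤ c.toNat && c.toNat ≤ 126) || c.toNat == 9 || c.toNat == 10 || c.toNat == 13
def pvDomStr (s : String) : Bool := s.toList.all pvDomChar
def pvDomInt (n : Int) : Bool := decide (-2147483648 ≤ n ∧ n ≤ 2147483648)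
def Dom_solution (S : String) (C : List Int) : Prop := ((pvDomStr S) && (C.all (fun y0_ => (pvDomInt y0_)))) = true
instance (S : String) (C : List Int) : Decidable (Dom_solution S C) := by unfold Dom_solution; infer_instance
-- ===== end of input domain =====

-- B splits the sentinel-extended (char,cost) pairs into maximal runs instead of A's
-- one-pass state machine; equivalence is about the RETURN value only (both Pythons
-- also append 0 to C in place, an identical side effect).

-- ===== PORT A =====
-- loop body of A's for-loop; state = (memo[0], memo[1], answer, prev)
def solutionStep (T : List Char) (D : List Int) (st : Int × Int × Int × Int) (i : Int) : Int × Int × Int × Int :=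
  if PySem.List.pyGetD T st.2.2.2 ' ' ≠ PySem.List.pyGetD T i ' ' then
    (PySem.List.pyGetD D i 0, PySem.List.pyGetD D i 0, st.2.2.1 + (st.1 - st.2.1), i)
  else
    (st.1 + PySem.List.pyGetD D i 0, max st.2.1 (PySem.List.pyGetD D i 0), st.2.2.1, st.2.2.2)

-- pyGetD is exact here: Pre_solution puts every accessed index in range
-- (Python raises IndexError exactly when len(C) < len(S), excluded by Pre_solution).
def solution (S : String) (C : List Int) : Int :=
  let N : Int := (S.toList.length : Int)        -- N = len(S)
  let T := S.toList ++ ['Z']                    -- S += "Z"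
  let D := C ++ [0]                             -- C.append(0)
  let memo0 := PySem.List.pyGetD D 0 0          -- memo = [C[0], C[0]]
  ((PySem.List.pyRange 1 (N + 1) 1).foldl (solutionStep T D) (memo0, memo0, 0, 0)).2.2.1

-- ===== PORT B =====
-- max(costs); [] is unreachable (every run is nonempty)
def pymax (l : List Int) : Int :=
  match l with
  | [] => 0
  | h :: t => t.foldl max h

-- Source B's while loop: peel the first maximal run off `pairs`; stop when the run is the whole rest
def go : List (Char × Int) → Int
  | [] => 0
  | (c, x) :: rest =>
    if rest.dropWhile (fun p => p.1 == c) = [] then 0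
    else
      let costs := x :: (rest.takeWhile (fun p => p.1 == c)).map Prod.snd
      costs.sum - pymax costs + go (rest.dropWhile (fun p => p.1 == c))
termination_by l => l.length
decreasing_by
  simp only [List.length_cons]
  exact Nat.lt_succ_of_le (List.length_dropWhile_le _ _)

def solution_alt (S : String) (C : List Int) : Int :=
  let T := S.toList ++ ['Z']
  let D := C ++ [0]
  go (T.zip D)

-- ===== PRECONDITION & SPEC =====
-- Pre_ excludes exactly the inputs where Python A raises IndexError at C[i] (len(C) < len(S)).
def Pre_solution (S : String) (C : List Int) : Prop := S.toList.length ≤ C.length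
instance (S : String) (C : List Int) : Decidable (Pre_solution S C) := by unfold Pre_solution; infer_instance
def pvWitness_solution : String × List Int := ("aab", [1, 2, 3])

def Spec_solution (S : String) (C : List Int) (out : Int) : Prop := out = solution_alt S C
instance (S : String) (C : List Int) (out : Int) : Decidable (Spec_solution S C out) := by unfold Spec_solution; infer_instance

-- ===== CLAIM (what is proved, stated in full; the proofs are below) =====
def Claim_equal_solution : Prop := ∀ (S : String) (C : List Int), Dom_solution S C → Pre_solution S C → Spec_solution S C (solution S C)

-- ===== LEMMAS AND PROOFS =====

-- A's state machine as a structural recursion on the (char, cost) pair list: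
-- c = character of the current run, m0/m1 = its running sum/max
def goAux (c : Char) (m0 m1 : Int) : List (Char × Int) → Int
  | [] => 0
  | (c', x) :: r => if c = c' then goAux c (m0 + x) (max m1 x) r
                    else (m0 - m1) + goAux c' x x r

lemma foldl_add_init (l : List Int) : ∀ x : Int, l.foldl (· + ·) x = x + l.sum := by
  induction l with
  | nil => simp
  | cons h t ih => intro x; simp [List.foldl_cons, ih, add_assoc]

lemma goAux_eq (rest : List (Char × Int)) : ∀ (c : Char) (m0 m1 : Int),
    goAux c m0 m1 rest =
      if rest.dropWhile (fun p => p.1 == c) = [] then 0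
      else ((rest.takeWhile (fun p => p.1 == c)).map Prod.snd).foldl (· + ·) m0
           - ((rest.takeWhile (fun p => p.1 == c)).map Prod.snd).foldl max m1
           + go (rest.dropWhile (fun p => p.1 == c)) := by
  induction rest with
  | nil => intro c m0 m1; simp [goAux]
  | cons p r ih =>
    intro c m0 m1
    obtain ⟨c', x⟩ := p
    by_cases h : c = c'
    · subst h
      simp only [goAux, List.dropWhile_cons, List.takeWhile_cons, beq_self_eq_true,
        if_pos trivial, List.map_cons, List.foldl_cons]
      exact ih c (m0 + x) (max m1 x)
    · have hb : ((c', x).1 == c) = false := by simp [Ne.symm h]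
      simp only [goAux, if_neg h, List.dropWhile_cons, List.takeWhile_cons, hb]
      simp only [Bool.false_eq_true, if_false, List.map_nil, List.foldl_nil]
      have hne : (c', x) :: r ≠ [] := by simp
      rw [if_neg hne]
      have hgo : go ((c', x) :: r) = goAux c' x x r := by
        rw [ih c' x x]
        simp only [go]
        split
        · rfl
        · simp only [pymax, List.sum_cons]
          rw [foldl_add_init]
      rw [hgo]

lemma go_cons (c : Char) (x : Int) (rest : List (Char × Int)) :
    go ((c, x) :: rest) = goAux c x x rest := by
  rw [goAux_eq]
  simp only [go]
  split
  · rfl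
  · simp only [pymax, List.sum_cons]
    rw [foldl_add_init]

-- the bridge: A's indexed foldl over range(a, a+len(l)) equals goAux over the pair list l
lemma bridge (T : List Char) (D : List Int) :
    ∀ (l : List (Char × Int)) (a prev m0 m1 ans : Int),
      (∀ k (h : k < l.length), l[k] = (PySem.List.pyGetD T (a + k) ' ', PySem.List.pyGetD D (a + k) 0)) →
      ((PySem.List.pyRange a (a + l.length) 1).foldl (solutionStep T D) (m0, m1, ans, prev)).2.2.1
        = ans + goAux (PySem.List.pyGetD T prev ' ') m0 m1 l := by
  intro l
  induction l with
  | nil => intro a prev m0 m1 ans _; simp [PySem.List.pyRange_one_eq_nil, goAux]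
  | cons p r ih =>
    intro a prev m0 m1 ans hk
    obtain ⟨c', x⟩ := p
    have h0 := hk 0 (by simp)
    simp only [Nat.cast_zero, add_zero, List.getElem_cons_zero, Prod.mk.injEq] at h0
    obtain ⟨h0c, h0x⟩ := h0
    subst h0c; subst h0x
    have hcons : PySem.List.pyRange a (a + ((PySem.List.pyGetD T a ' ', PySem.List.pyGetD D a 0) :: r).length) 1
        = a :: PySem.List.pyRange (a + 1) (a + ((PySem.List.pyGetD T a ' ', PySem.List.pyGetD D a 0) :: r).length) 1 :=
      PySem.List.pyRange_one_cons (by push_cast [List.length_cons]; omega)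
    have hlen : a + (((PySem.List.pyGetD T a ' ', PySem.List.pyGetD D a 0) :: r).length : Int) = (a + 1) + r.length := by
      push_cast [List.length_cons]; ring
    rw [hcons, List.foldl_cons, hlen]
    have hk' : ∀ k (h : k < r.length),
        r[k] = (PySem.List.pyGetD T ((a + 1) + k) ' ', PySem.List.pyGetD D ((a + 1) + k) 0) := by
      intro k h
      have := hk (k + 1) (by simpa using Nat.succ_lt_succ h)
      simpa [add_assoc, add_comm, add_left_comm] using this
    by_cases hc : PySem.List.pyGetD T prev ' ' = PySem.List.pyGetD T a ' '
    · have hstep : solutionStep T D (m0, m1, ans, prev) a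
          = (m0 + PySem.List.pyGetD D a 0, max m1 (PySem.List.pyGetD D a 0), ans, prev) := by
        simp [solutionStep, hc]
      rw [hstep, ih (a + 1) prev _ _ ans hk']
      simp [goAux, hc]
    · have hstep : solutionStep T D (m0, m1, ans, prev) a
          = (PySem.List.pyGetD D a 0, PySem.List.pyGetD D a 0, ans + (m0 - m1), a) := by
        simp [solutionStep, hc]
      rw [hstep, ih (a + 1) a _ _ _ hk']
      simp [goAux, hc]
      ring

-- ===== VERDICT (by name: the statement is the Claim_ definition above) =====
theorem solution_spec : Claim_equal_solution := by
  intro S C _ hPre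
  unfold Pre_solution at hPre
  unfold Spec_solution
  simp only [solution, solution_alt]
  obtain ⟨c0, T', hT⟩ : ∃ c0 T', S.toList ++ ['Z'] = c0 :: T' := by
    cases S.toList with
    | nil => exact ⟨'Z', [], rfl⟩
    | cons h t => exact ⟨h, t ++ ['Z'], rfl⟩
  obtain ⟨d0, D', hD⟩ : ∃ d0 D', C ++ [0] = d0 :: D' := by
    cases C with
    | nil => exact ⟨0, [], rfl⟩
    | cons h t => exact ⟨h, t ++ [0], rfl⟩
  have hTlen : T'.length = S.toList.length := by
    have := congrArg List.length hT
    simp only [List.length_append, List.length_cons, List.length_nil] at this; omega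
  have hDlen : D'.length = C.length := by
    have := congrArg List.length hD
    simp only [List.length_append, List.length_cons, List.length_nil] at this; omega
  have hzlen : (T'.zip D').length = S.toList.length := by
    simp only [List.length_zip, hTlen, hDlen]; omega
  rw [hT, hD, List.zip_cons_cons, go_cons]
  have hidx : ∀ k (h : k < (T'.zip D').length),
      (T'.zip D')[k] = (PySem.List.pyGetD (c0 :: T') ((1:Int) + k) ' ', PySem.List.pyGetD (d0 :: D') ((1:Int) + k) 0) := by
    intro k h
    have hk1 : ((1:Int) + k) = ((k + 1 : Nat) : Int) := by push_cast; ring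
    rw [hk1, PySem.List.pyGetD_natCast, PySem.List.pyGetD_natCast]
    rw [hzlen] at h
    have hkT : k < T'.length := by omega
    have hkD : k < D'.length := by omega
    rw [List.getElem_zip]
    simp [hkT, hkD]
  have hN : ((S.toList.length : Int) + 1) = 1 + ((T'.zip D').length : Int) := by
    rw [hzlen]; ring
  rw [hN, bridge (c0 :: T') (d0 :: D') (T'.zip D') 1 0 _ _ _ hidx]
  simp [PySem.List.pyGetD_zero_cons]
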